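-- pv_equiv track=rewrite | github.com/Prajwalkhandait109/Dailycode | segregate_even_odd_numbers.py | segregateEvenOdd
-- ===== SOURCE A (Python) =====
-- def segregateEvenOdd(arr):
--     even = [num for num in arr if num % 2 == 0]
--     odd = [num for num in arr if num % 2 != 0]
--
--     even.sort()            # Ascending order
--     odd.sort()
--
--     # Overwrite original array
--     for i in range(len(even)):
--         arr[i] = even[i]
--     for j in range(len(odd)):
--         arr[len(even) + j] = odd[j]
--
--     return arr
-- ===== SOURCE B (Python) =====
-- def segregateEvenOdd(arr):
--     # Sort once, then split the sorted copy by parity (in-place overwrite like A).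
--     s = sorted(arr)
--     evens = [num for num in s if num % 2 == 0]
--     odds = [num for num in s if num % 2 != 0]
--     arr[:] = evens + odds
--     return arr
-- ===== Notes on version B (the rewrite author's own statement) =====
-- stated objective: simpler
-- what changed: B sorts the whole list once and then splits the sorted copy by parity, instead of A's partition-into-two-lists, sort each half, and element-by-element index write-back.
import Mathlib
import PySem

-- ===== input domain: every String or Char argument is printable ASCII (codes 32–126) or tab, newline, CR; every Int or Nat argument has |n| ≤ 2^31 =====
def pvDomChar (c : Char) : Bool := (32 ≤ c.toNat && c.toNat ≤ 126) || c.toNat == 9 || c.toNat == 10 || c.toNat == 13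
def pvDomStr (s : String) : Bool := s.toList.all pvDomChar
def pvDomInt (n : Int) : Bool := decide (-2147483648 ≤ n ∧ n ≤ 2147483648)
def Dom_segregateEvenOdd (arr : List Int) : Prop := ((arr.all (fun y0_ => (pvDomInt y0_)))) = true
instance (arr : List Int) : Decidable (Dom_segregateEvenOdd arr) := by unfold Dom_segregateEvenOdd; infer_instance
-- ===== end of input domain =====

-- B sorts the input once and then splits the sorted copy by parity, instead of A's
-- partition-first-then-sort-each-half; both mutate arr in place and return it, so the
-- proved equivalence about the return value also describes the final state of arr.

-- ===== PORT A =====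
def segregateEvenOdd (arr : List Int) : List Int :=
  let even := arr.filter (fun num => PySem.Int.mod num 2 == 0)
  let odd := arr.filter (fun num => !(PySem.Int.mod num 2 == 0))
  let evenS := PySem.List.sorted even (fun x => x) false
  let oddS := PySem.List.sorted odd (fun x => x) false
  let arr1 := (PySem.List.pyRange 0 (evenS.length : Int) 1).foldl
    (fun acc i => PySem.List.pySetD acc i (PySem.List.pyGetD evenS i 0)) arr
  let arr2 := (PySem.List.pyRange 0 (oddS.length : Int) 1).foldl
    (fun acc j => PySem.List.pySetD acc ((evenS.length : Int) + j) (PySem.List.pyGetD oddS j 0)) arr1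
  arr2

-- ===== PORT B =====
def segregateEvenOdd_alt (arr : List Int) : List Int :=
  let s := PySem.List.sorted arr (fun x => x) false
  let evens := s.filter (fun num => PySem.Int.mod num 2 == 0)
  let odds := s.filter (fun num => !(PySem.Int.mod num 2 == 0))
  evens ++ odds

-- ===== PRECONDITION & SPEC =====
def Spec_segregateEvenOdd (arr : List Int) (out : List Int) : Prop := out = segregateEvenOdd_alt arr
instance (arr : List Int) (out : List Int) : Decidable (Spec_segregateEvenOdd arr out) := by unfold Spec_segregateEvenOdd; infer_instance

-- ===== CLAIM (what is proved, stated in full; the proofs are below) =====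
def Claim_equal_segregateEvenOdd : Prop := ∀ (arr : List Int), Dom_segregateEvenOdd arr → Spec_segregateEvenOdd arr (segregateEvenOdd arr)

-- ===== LEMMAS AND PROOFS =====

-- The write loop over nat indices: writing ys at positions k, k+1, … splices ys into a.
theorem writeLoop_nat (ys : List Int) : ∀ (k : Nat) (a : List Int), k + ys.length ≤ a.length →
    (List.range ys.length).foldl (fun acc j => acc.set (k + j) (ys.getD j 0)) a
      = a.take k ++ ys ++ a.drop (k + ys.length) := by
  induction ys with
  | nil => intro k a h; simp
  | cons y t ih =>
    intro k a h
    have hk : k < a.length := by simp at h; omega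
    have hfun : (fun (acc : List Int) (j : Nat) => acc.set (k + Nat.succ j) ((y :: t).getD (Nat.succ j) 0))
        = (fun (acc : List Int) (j : Nat) => acc.set ((k+1) + j) (t.getD j 0)) := by
      funext acc j
      simp [Nat.succ_eq_add_one]
      ring_nf
    rw [List.length_cons, List.range_succ_eq_map, List.foldl_cons, List.foldl_map]
    simp only [Nat.add_zero, List.getD_cons_zero]
    have := ih (k+1) (a.set k y) (by simp at h ⊢; omega)
    simp only [hfun]
    rw [this]
    rw [List.set_eq_take_cons_drop y hk]
    have hTlen : (a.take k).length = k := by simp; omega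
    have h1 : (a.take k ++ y :: a.drop (k+1)).take (k+1) = a.take k ++ [y] := by
      rw [List.take_append, hTlen]
      simp [List.take_take]
    have h2 : (a.take k ++ y :: a.drop (k+1)).drop (k+1+t.length) = a.drop (k + (t.length+1)) := by
      rw [List.drop_append, hTlen]
      rw [List.drop_of_length_le (by simp; omega)]
      have e1 : k + 1 + t.length - k = t.length + 1 := by omega
      rw [e1]
      simp [List.drop_drop]
      congr 1
      omega
    rw [h1, h2]
    simp

-- The same loop as A writes it, over an Int range, offset k.
theorem writeLoop_int (ys : List Int) (k : Nat) (a : List Int) (h : k + ys.length ≤ a.length) :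
    (PySem.List.pyRange 0 (ys.length : Int) 1).foldl
        (fun acc j => PySem.List.pySetD acc ((k : Int) + j) (PySem.List.pyGetD ys j 0)) a
      = a.take k ++ ys ++ a.drop (k + ys.length) := by
  rw [PySem.List.pyRange_one, List.foldl_map]
  have : (fun (acc : List Int) (j : Nat) => PySem.List.pySetD acc ((k : Int) + ((0 : Int) + j)) (PySem.List.pyGetD ys ((0:Int) + j) 0))
      = (fun (acc : List Int) (j : Nat) => acc.set (k + j) (ys.getD j 0)) := by
    funext acc j
    have h1 : (k : Int) + ((0 : Int) + j) = ((k + j : Nat) : Int) := by push_cast; ring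
    have h2 : ((0:Int) + (j : Int)) = ((j : Nat) : Int) := by ring
    rw [h1, h2, PySem.List.pySetD_natCast, PySem.List.pyGetD_natCast]
  simp only [sub_zero, Int.toNat_natCast, this]
  exact writeLoop_nat ys k a h

-- A's k = 0 loop, written without the explicit offset.
theorem writeLoop_int0 (ys a : List Int) (h : ys.length ≤ a.length) :
    (PySem.List.pyRange 0 (ys.length : Int) 1).foldl
        (fun acc i => PySem.List.pySetD acc i (PySem.List.pyGetD ys i 0)) a
      = ys ++ a.drop ys.length := by
  have hfun : (fun (acc : List Int) (i : Int) => PySem.List.pySetD acc i (PySem.List.pyGetD ys i 0))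
      = (fun (acc : List Int) (i : Int) => PySem.List.pySetD acc ((0 : Nat) + i) (PySem.List.pyGetD ys i 0)) := by
    funext acc i; norm_num
  rw [hfun, writeLoop_int ys 0 a (by omega)]
  simp

-- sort-then-filter equals filter-then-sort (identity key).
theorem sorted_filter_comm (p : Int → Bool) (arr : List Int) :
    PySem.List.sorted (arr.filter p) (fun x => x) false
      = (PySem.List.sorted arr (fun x => x) false).filter p := by
  apply PySem.List.sorted_id_eq_of_perm_of_pairwise
  · exact (PySem.List.sorted_perm arr (fun x => x) false).filter p
  · exact (PySem.List.sorted_pairwise arr (fun x => x)).filter p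

-- ===== VERDICT (by name: the statement is the Claim_ definition above) =====
theorem segregateEvenOdd_spec : Claim_equal_segregateEvenOdd := by
  intro arr _
  unfold Spec_segregateEvenOdd segregateEvenOdd segregateEvenOdd_alt
  simp only []
  set evenS := PySem.List.sorted (arr.filter (fun num => PySem.Int.mod num 2 == 0)) (fun x => x) false with hES
  set oddS := PySem.List.sorted (arr.filter (fun num => !(PySem.Int.mod num 2 == 0))) (fun x => x) false with hOS
  have hlen : evenS.length + oddS.length = arr.length := by
    rw [hES, hOS, PySem.List.length_sorted, PySem.List.length_sorted]
    exact (List.length_eq_length_filter_add (fun num => PySem.Int.mod num 2 == 0) (l := arr)).symm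
  rw [writeLoop_int0 evenS arr (by omega)]
  have hlen1 : (evenS ++ arr.drop evenS.length).length = arr.length := by
    rw [List.length_append, List.length_drop]; omega
  rw [writeLoop_int oddS evenS.length _ (by rw [hlen1]; omega)]
  rw [List.take_left, List.drop_of_length_le (by rw [hlen1]; omega)]
  rw [hES, hOS, sorted_filter_comm, sorted_filter_comm]
  simp only [List.append_nil]
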